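-- pv_equiv track=rewrite | github.com/AmitayDesign/Podiz | scripting/firebase.py | splitNameIntoArray
-- ===== SOURCE A (Python) =====
-- def splitNameIntoArray(name):
--     lowerName = name.lower()
--
--     prev = ""
--     array = []
--
--     for letter in lowerName:
--         prev += letter
--         array.append(prev)
--
--     return array
-- ===== SOURCE B (Python) =====
-- def splitNameIntoArray(name):
--     low = name.lower()
--     return [low[:i] for i in range(1, len(low) + 1)]
-- ===== Notes on version B (the rewrite author's own statement) =====
-- stated objective: simpler
-- what changed: Replaces the running accumulator string appended letter by letter with a comprehension that slices each prefix low[:i] directly from the lowercased name.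
import Mathlib
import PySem

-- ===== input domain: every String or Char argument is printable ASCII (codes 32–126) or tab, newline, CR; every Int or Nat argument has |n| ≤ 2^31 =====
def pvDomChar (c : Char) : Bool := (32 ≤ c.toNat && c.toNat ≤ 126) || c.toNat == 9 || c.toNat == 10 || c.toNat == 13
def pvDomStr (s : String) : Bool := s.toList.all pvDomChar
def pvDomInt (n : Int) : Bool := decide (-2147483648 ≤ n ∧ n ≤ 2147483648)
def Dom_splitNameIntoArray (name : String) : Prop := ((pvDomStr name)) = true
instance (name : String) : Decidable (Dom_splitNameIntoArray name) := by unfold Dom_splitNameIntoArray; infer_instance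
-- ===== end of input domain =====

-- B builds each prefix by slicing the lowercased name directly instead of maintaining a running accumulator string.

-- ===== PORT A =====
def splitNameIntoArray (name : String) : List String :=
  let lowerName := PySem.Str.lower name
  (lowerName.toList.foldl
    (fun (st : List Char × List String) letter =>
      let prev := st.1 ++ [letter]
      (prev, st.2 ++ [String.ofList prev]))
    ([], [])).2

-- ===== PORT B =====
def splitNameIntoArray_alt (name : String) : List String :=
  let low := PySem.Str.lower name
  (PySem.List.pyRange 1 ((low.toList.length : Int) + 1) 1).map
    (fun i => String.ofList (PySem.List.slice low.toList none (some i)))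

-- ===== PRECONDITION & SPEC =====
def Spec_splitNameIntoArray (name : String) (out : List String) : Prop := out = splitNameIntoArray_alt name
instance (name : String) (out : List String) : Decidable (Spec_splitNameIntoArray name out) := by unfold Spec_splitNameIntoArray; infer_instance

-- ===== CLAIM (what is proved, stated in full; the proofs are below) =====
def Claim_equal_splitNameIntoArray : Prop := ∀ (name : String), Dom_splitNameIntoArray name → Spec_splitNameIntoArray name (splitNameIntoArray name)

-- ===== LEMMAS AND PROOFS =====

/-- A's fold, characterised: the array is `acc` followed by all prefixes of `prev ++ l`
    strictly longer than `prev`. -/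
theorem foldA_eq (l : List Char) : ∀ (prev : List Char) (acc : List String),
    (l.foldl (fun (st : List Char × List String) letter =>
        let prev := st.1 ++ [letter]
        (prev, st.2 ++ [String.ofList prev])) (prev, acc)).2
      = acc ++ (List.range l.length).map (fun k => String.ofList (prev ++ l.take (k + 1))) := by
  induction l with
  | nil => simp
  | cons c t ih =>
      intro prev acc
      simp only [List.foldl_cons, ih, List.length_cons, List.range_succ_eq_map,
        List.map_cons, List.map_map]
      simp [List.append_assoc, Function.comp]

-- ===== VERDICT (by name: the statement is the Claim_ definition above) =====
theorem splitNameIntoArray_spec : Claim_equal_splitNameIntoArray := by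
  intro name _
  unfold Spec_splitNameIntoArray splitNameIntoArray splitNameIntoArray_alt
  simp only [foldA_eq, List.nil_append]
  rw [PySem.List.pyRange_one]
  simp only [List.map_map,
    show (((PySem.Str.lower name).toList.length : Int) + 1 - 1).toNat
      = (PySem.Str.lower name).toList.length by omega]
  apply List.map_congr_left
  intro k hk
  simp only [Function.comp]
  rw [PySem.List.slice_to _ (show (0:Int) ≤ 1 + (k:Int) by omega),
    show ((1:Int) + (k:Int)).toNat = k + 1 by omega]
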